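-- pv_equiv track=rewrite | github.com/leedonggyu1848/baekjoon | 프로그래머스/2/42860. 조이스틱/조이스틱.py | cal_right_dist
-- ===== SOURCE A (Python) =====
-- def cal_right_dist(tar):
--     src = 0
--     if src == tar:
--         return 0
--     ret = 0
--     while src != tar-1:
--         ret += 1
--         src += 1
--     return ret
-- ===== SOURCE B (Python) =====
-- def cal_right_dist(tar):
--     return max(tar - 1, 0)
-- ===== Notes on version B (the rewrite author's own statement) =====
-- stated objective: faster
-- what changed: replaces the counting while-loop with the closed form max(tar-1, 0)
import Mathlib
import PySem

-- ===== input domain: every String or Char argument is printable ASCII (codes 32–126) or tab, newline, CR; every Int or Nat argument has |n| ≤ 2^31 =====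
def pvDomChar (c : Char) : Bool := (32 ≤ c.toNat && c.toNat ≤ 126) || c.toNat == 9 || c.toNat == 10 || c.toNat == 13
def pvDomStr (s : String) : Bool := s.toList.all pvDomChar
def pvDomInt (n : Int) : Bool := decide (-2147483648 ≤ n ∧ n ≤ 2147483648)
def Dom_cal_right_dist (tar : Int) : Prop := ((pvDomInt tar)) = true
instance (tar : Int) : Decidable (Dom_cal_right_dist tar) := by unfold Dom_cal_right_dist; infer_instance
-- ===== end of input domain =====

-- B replaces A's counting while-loop with the closed form max(tar-1, 0) (O(1) vs O(tar)).

-- ===== PORT A =====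
-- A's while loop 'while src != tar-1: ret += 1; src += 1' as fuel recursion;
-- fuel = tar.toNat is enough since the loop runs exactly (tar-1) times when tar ≥ 1.
def calLoopA (tar : Int) (fuel : Nat) (src ret : Int) : Int :=
  match fuel with
  | 0 => ret
  | n+1 => if src ≠ tar - 1 then calLoopA tar n (src + 1) (ret + 1) else ret

def cal_right_dist (tar : Int) : Int :=
  if (0 : Int) = tar then 0
  else calLoopA tar tar.toNat 0 0

-- ===== PORT B =====
def cal_right_dist_alt (tar : Int) : Int := max (tar - 1) 0

-- ===== PRECONDITION & SPEC =====
-- A's while loop never terminates when tar < 0 (src counts upward past tar-1), so those inputs are excluded.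
def Pre_cal_right_dist (tar : Int) : Prop := 0 ≤ tar
instance (tar : Int) : Decidable (Pre_cal_right_dist tar) := by unfold Pre_cal_right_dist; infer_instance
def pvWitness_cal_right_dist : Int := (5)

def Spec_cal_right_dist (tar : Int) (out : Int) : Prop := out = cal_right_dist_alt tar
instance (tar : Int) (out : Int) : Decidable (Spec_cal_right_dist tar out) := by unfold Spec_cal_right_dist; infer_instance

-- ===== CLAIM (what is proved, stated in full; the proofs are below) =====
def Claim_equal_cal_right_dist : Prop := ∀ (tar : Int), Dom_cal_right_dist tar → Pre_cal_right_dist tar → Spec_cal_right_dist tar (cal_right_dist tar)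

-- ===== LEMMAS AND PROOFS =====
-- Loop invariant: with enough fuel and src ≤ tar-1, the loop adds (tar-1-src) to ret.
theorem calLoopA_eq (tar : Int) (fuel : Nat) (src ret : Int)
    (hle : src ≤ tar - 1) (hfuel : tar - 1 - src ≤ fuel) :
    calLoopA tar fuel src ret = ret + (tar - 1 - src) := by
  induction fuel generalizing src ret with
  | zero =>
    simp [calLoopA]
    omega
  | succ n ih =>
    unfold calLoopA
    by_cases h : src = tar - 1
    · simp [h]
    · simp [h]
      rw [ih (src + 1) (ret + 1) (by omega) (by omega)]
      ring

-- ===== VERDICT (by name: the statement is the Claim_ definition above) =====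
theorem cal_right_dist_spec : Claim_equal_cal_right_dist := by
  intro tar _ hpre
  unfold Spec_cal_right_dist cal_right_dist cal_right_dist_alt
  by_cases h0 : (0 : Int) = tar
  · simp [← h0]
  · have hpre2 : 0 ≤ tar := hpre
    have h1 : 1 ≤ tar := by omega
    rw [if_neg h0, calLoopA_eq tar tar.toNat 0 0 (by omega) (by omega)]
    omega
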